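-- pv_equiv track=rewrite | github.com/tszwong/BU-CS-111 | ps3/ps3pr4.py | jscore
-- ===== SOURCE A (Python) =====
-- def first_occur(elem, seq):
--     """takes as inputs an element elem and a sequence seq,
--     and that uses recursion (i.e., that calls itself recursively)
--     to find and return the index of the first occurrence of elem in seq"""
--
--     not_in = -1
--
--     if len(seq) == 0:
--         return not_in
--     if seq[0] == elem:
--         return 0
--     else:
--         rest_seq = first_occur(elem, seq[1:])
--         if rest_seq == not_in:
--             return rest_seq
--         else:
--             return 1 + rest_seq
--
-- def rem_first(c, s):
--     """takes as inputs a single character c and an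
--     arbitrary string s and that uses recursion to create
--     and return a version of s in which only the first
--     occurrence of c (if any) has been removed"""
--
--     if s == "":
--         return ""
--     else:
--         rest_s = rem_first(c, s[1:])
--         if first_occur(c, s) != -1:
--             index = first_occur(c, s)
--             string_rest = s[0:index] + s[index + 1:len(s)]
--             return string_rest
--         else:
--             rest_s = rem_first(c, s[1:])
--             return s[0] + rest_s
--
-- def jscore(s1, s2):
--     """takes two strings s1 and s2 as inputs and that uses
--     recursion to compute and return the Jotto score of s1 compared with s2"""
--
--     if not s1 or not s2:
--         return 0
--     else:
--         jscore_rest = jscore(s1[1:], s2)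
--         if s1[0] in s2:
--             current_score = rem_first(s1[0], s2)
--             jscore_rest = jscore(s1[1:], current_score)
--             return 1 + jscore_rest
--         else:
--             return jscore_rest
-- ===== SOURCE B (Python) =====
-- def jscore(s1, s2):
--     """takes two strings s1 and s2 as inputs and computes the Jotto score
--     (size of the multiset intersection of their characters) by sorting both
--     strings and walking them with a two-pointer merge."""
--     a = sorted(s1)
--     b = sorted(s2)
--     i = j = score = 0
--     while i < len(a) and j < len(b):
--         if a[i] == b[j]:
--             score += 1
--             i += 1
--             j += 1
--         elif a[i] < b[j]:
--             i += 1
--         else: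
--             j += 1
--     return score
-- ===== Notes on version B (the rewrite author's own statement) =====
-- stated objective: faster
-- what changed: Replaces A's recursive per-character scan-and-remove (jscore's double recursion with rem_first/first_occur rescans, exponential in the worst case) with sort-then-two-pointer merge counting the multiset intersection; intended as asymptotically faster (measured: A already times out at n=16 where B returns instantly; no finite ratio was measurable).
import Mathlib
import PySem

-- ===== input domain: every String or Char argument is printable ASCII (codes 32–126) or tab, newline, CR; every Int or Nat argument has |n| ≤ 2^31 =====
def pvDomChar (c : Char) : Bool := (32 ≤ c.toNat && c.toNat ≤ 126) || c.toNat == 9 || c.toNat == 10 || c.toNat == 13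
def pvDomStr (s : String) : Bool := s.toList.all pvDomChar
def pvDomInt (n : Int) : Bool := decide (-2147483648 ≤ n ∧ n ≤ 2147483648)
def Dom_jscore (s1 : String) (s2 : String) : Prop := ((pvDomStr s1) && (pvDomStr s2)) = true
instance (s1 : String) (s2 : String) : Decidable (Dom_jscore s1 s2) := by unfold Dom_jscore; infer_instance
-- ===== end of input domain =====

-- ===== PORT A =====
-- B replaces A's recursive scan-and-remove with sort + two-pointer merge (intended as faster: in a timing run A timed out at n=16 where B returned; no ratio was measurable); return values proved equal.
-- helper of A: first_occur (recursive index of first occurrence, -1 if absent)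
def firstOccur (elem : Char) : List Char → Int
  | [] => -1
  | x :: rest =>
    if x = elem then 0
    else
      let restSeq := firstOccur elem rest
      if restSeq = -1 then restSeq else 1 + restSeq

-- helper of A: rem_first (Python computes rest_s unconditionally, then branches)
def remFirst (c : Char) : List Char → List Char
  | [] => []
  | x :: rest =>
    let restS := remFirst c rest
    if firstOccur c (x :: rest) ≠ -1 then
      let index := firstOccur c (x :: rest)
      PySem.List.slice (x :: rest) (some 0) (some index) ++
        PySem.List.slice (x :: rest) (some (index + 1)) (some (PySem.List.len (x :: rest)))
    else
      x :: restS

def jscoreL : List Char → List Char → Int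
  | [], _ => 0
  | c :: rest, s2 =>
    if s2 = [] then 0
    else
      let jrest := jscoreL rest s2
      if c ∈ s2 then
        let currentScore := remFirst c s2
        1 + jscoreL rest currentScore
      else jrest

def jscore (s1 : String) (s2 : String) : Int := jscoreL s1.toList s2.toList

-- ===== PORT B =====
-- two-pointer merge over the two sorted character lists
def mergeCount : List Char → List Char → Int
  | [], _ => 0
  | _ :: _, [] => 0
  | a :: ta, b :: tb =>
    if a = b then 1 + mergeCount ta tb
    else if a < b then mergeCount ta (b :: tb)
    else mergeCount (a :: ta) tb
  termination_by l1 l2 => l1.length + l2.length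

def jscore_alt (s1 : String) (s2 : String) : Int :=
  mergeCount (PySem.List.sorted s1.toList (fun x => x) false)
             (PySem.List.sorted s2.toList (fun x => x) false)

-- ===== PRECONDITION & SPEC =====
def Spec_jscore (s1 : String) (s2 : String) (out : Int) : Prop := out = jscore_alt s1 s2
instance (s1 : String) (s2 : String) (out : Int) : Decidable (Spec_jscore s1 s2 out) := by unfold Spec_jscore; infer_instance

-- ===== CLAIM (what is proved, stated in full; the proofs are below) =====
def Claim_equal_jscore : Prop := ∀ (s1 : String) (s2 : String), Dom_jscore s1 s2 → Spec_jscore s1 s2 (jscore s1 s2)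

-- ===== LEMMAS AND PROOFS =====

-- firstOccur returns the index of the first occurrence, -1 if absent
theorem firstOccur_spec (c : Char) : ∀ s : List Char,
    firstOccur c s = if c ∈ s then (s.idxOf c : Int) else -1 := by
  intro s
  induction s with
  | nil => simp [firstOccur]
  | cons x rest ih =>
    by_cases hx : x = c
    · subst hx; simp [firstOccur, List.idxOf_cons_self]
    · by_cases hm : c ∈ rest
      · have hnn : (0 : Int) ≤ (rest.idxOf c : Int) := by positivity
        simp [firstOccur, hx, ih, hm, Ne.symm hx, List.idxOf_cons_ne _ (by simpa using hx)]
        omega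
      · simp [firstOccur, hx, ih, hm, Ne.symm hx]

-- removing the element at its first index is List.erase
theorem erase_take_drop (c : Char) : ∀ s : List Char, c ∈ s →
    s.take (s.idxOf c) ++ s.drop (s.idxOf c + 1) = s.erase c := by
  intro s
  induction s with
  | nil => simp
  | cons x rest ih =>
    intro hmem
    by_cases hx : x = c
    · subst hx; simp [List.idxOf_cons_self]
    · have hm : c ∈ rest := by cases hmem with
        | head => exact absurd rfl hx
        | tail _ h => exact h
      rw [List.erase_cons_tail (by simpa using hx), ← ih hm,
        List.idxOf_cons_ne _ (by simpa using hx)]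
      simp

theorem remFirst_eq_erase (c : Char) : ∀ s : List Char, remFirst c s = s.erase c := by
  intro s
  induction s with
  | nil => simp [remFirst]
  | cons x rest ih =>
    by_cases hmem : c ∈ x :: rest
    · have hi : firstOccur c (x :: rest) = ((x :: rest).idxOf c : Int) := by
        rw [firstOccur_spec]; simp [hmem]
      have hne : firstOccur c (x :: rest) ≠ -1 := by rw [hi]; omega
      simp only [remFirst]
      rw [if_pos hne, hi]
      rw [show ((((x :: rest).idxOf c : Int)) + 1) = (((x :: rest).idxOf c + 1 : Nat) : Int) by push_cast; ring]
      rw [PySem.List.slice_zero_start, PySem.List.slice_to_natCast,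
        show PySem.List.len (x :: rest) = (((x :: rest).length : Nat) : Int) from rfl,
        PySem.List.slice_natCast]
      rw [List.take_of_length_le (l := ((x :: rest).drop ((x :: rest).idxOf c + 1))) (by simp)]
      exact erase_take_drop c _ hmem
    · have hi : firstOccur c (x :: rest) = -1 := by rw [firstOccur_spec]; simp [hmem]
      have hm : c ∉ rest := fun h => hmem (List.mem_cons_of_mem _ h)
      simp only [remFirst]
      rw [if_neg (by simp [hi]), ih, List.erase_of_not_mem hm,
        List.erase_of_not_mem hmem]

-- A computes the cardinality of the multiset intersection
theorem jscoreL_eq_card : ∀ l1 l2 : List Char,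
    jscoreL l1 l2 = (((l1 : Multiset Char) ∩ (l2 : Multiset Char)).card : Int) := by
  intro l1
  induction l1 with
  | nil => intro l2; simp [jscoreL]
  | cons c rest ih =>
    intro l2
    by_cases h2 : l2 = []
    · subst h2; simp [jscoreL]
    · by_cases hmem : c ∈ l2
      · have hms : c ∈ (l2 : Multiset Char) := by simpa using hmem
        simp only [jscoreL, if_neg h2, hmem, if_true]
        rw [remFirst_eq_erase, ih, ← Multiset.cons_coe,
          Multiset.cons_inter_of_pos _ hms, Multiset.coe_erase]
        push_cast [Multiset.card_cons]; ring
      · have hms : c ∉ (l2 : Multiset Char) := by simpa using hmem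
        simp only [jscoreL, if_neg h2, hmem, if_false]
        rw [ih, ← Multiset.cons_coe, Multiset.cons_inter_of_neg _ hms]

-- B's merge over sorted lists computes the same cardinality
theorem mergeCount_eq_card : ∀ l1 l2 : List Char,
    l1.Pairwise (· ≤ ·) → l2.Pairwise (· ≤ ·) →
    mergeCount l1 l2 = (((l1 : Multiset Char) ∩ (l2 : Multiset Char)).card : Int) := by
  intro l1 l2 h1 h2
  induction l1, l2 using mergeCount.induct with
  | case1 l2 => simp [mergeCount]
  | case2 a ta => simp [mergeCount]
  | case3 ta b tb ih =>
    have hkey : (↑(b :: ta) : Multiset Char) ∩ ↑(b :: tb) = b ::ₘ (↑ta ∩ ↑tb) := by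
      rw [← Multiset.cons_coe, ← Multiset.cons_coe,
        Multiset.cons_inter_of_pos _ (Multiset.mem_cons_self b _), Multiset.erase_cons_head]
    rw [mergeCount, if_pos rfl, ih h1.of_cons h2.of_cons, hkey]
    push_cast [Multiset.card_cons]; ring
  | case4 a ta b tb hne hlt ih =>
    have hnotin : a ∉ (b :: tb : List Char) := by
      intro hmem
      rcases List.mem_cons.mp hmem with h | h
      · exact hne h
      · exact absurd (lt_of_lt_of_le hlt (List.rel_of_pairwise_cons h2 h)) (lt_irrefl a)
    have hkey : (↑(a :: ta) : Multiset Char) ∩ ↑(b :: tb) = ↑ta ∩ ↑(b :: tb) := by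
      rw [← Multiset.cons_coe,
        Multiset.cons_inter_of_neg _ (by rw [Multiset.mem_coe]; exact hnotin)]
    rw [mergeCount, if_neg hne, if_pos hlt, ih h1.of_cons h2, hkey]
  | case5 a ta b tb hne hnlt ih =>
    have hbl : b < a := lt_of_le_of_ne (not_lt.mp hnlt) (fun h => hne h.symm)
    have hnotin : b ∉ (a :: ta : List Char) := by
      intro hmem
      rcases List.mem_cons.mp hmem with h | h
      · exact hne h.symm
      · exact absurd (lt_of_lt_of_le hbl (List.rel_of_pairwise_cons h1 h)) (lt_irrefl b)
    have hkey : (↑(a :: ta) : Multiset Char) ∩ ↑(b :: tb) = ↑(a :: ta) ∩ ↑tb := by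
      rw [Multiset.inter_comm, ← Multiset.cons_coe,
        Multiset.cons_inter_of_neg _ (by rw [Multiset.mem_coe]; exact hnotin)]
      exact Multiset.inter_comm _ _
    rw [mergeCount, if_neg hne, if_neg hnlt, ih h1 h2.of_cons, hkey]

-- ===== VERDICT (by name: the statement is the Claim_ definition above) =====
theorem jscore_spec : Claim_equal_jscore := by
  intro s1 s2 _
  unfold Spec_jscore jscore jscore_alt
  have hp1 := PySem.List.sorted_perm s1.toList (fun x : Char => x) false
  have hp2 := PySem.List.sorted_perm s2.toList (fun x : Char => x) false
  rw [jscoreL_eq_card,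
    mergeCount_eq_card _ _
      (by simpa using PySem.List.sorted_pairwise s1.toList (fun x : Char => x))
      (by simpa using PySem.List.sorted_pairwise s2.toList (fun x : Char => x)),
    Multiset.coe_eq_coe.mpr hp1, Multiset.coe_eq_coe.mpr hp2]
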